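-- pv_equiv track=rewrite | github.com/switchbox-data/rate-design-platform | utils/pre/generate_adoption_scenario_yamls.py | _insert_blank_lines_between_runs
-- ===== SOURCE A (Python) =====
-- def _insert_blank_lines_between_runs(yaml_str: str) -> str:
--     """Insert a blank line before run keys 2+, not before the first run key."""
--     lines = yaml_str.splitlines()
--     out: list[str] = []
--     seen_run_key = False
--     for line in lines:
--         stripped = line.strip()
--         is_run_key = (
--             line.startswith("  ") and stripped.endswith(":") and stripped[:-1].isdigit()
--         )
--         if is_run_key and seen_run_key and (not out or out[-1] != ""):
--             out.append("")
--         if is_run_key: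
--             seen_run_key = True
--         out.append(line)
--     return "\n".join(out) + ("\n" if yaml_str.endswith("\n") else "")
-- ===== SOURCE B (Python) =====
-- def _insert_blank_lines_between_runs(yaml_str: str) -> str:
--     """Insert a blank line before run keys 2+, not before the first run key."""
--     lines = yaml_str.splitlines()
--     run_idx = [
--         i
--         for i, line in enumerate(lines)
--         if line.startswith("  ") and line.strip().endswith(":") and line.strip()[:-1].isdigit()
--     ]
--     need = set(run_idx[1:])
--     out: list[str] = []
--     for i, line in enumerate(lines):
--         if i in need and lines[i - 1] != "":
--             out.append("")
--         out.append(line)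
--     return "\n".join(out) + ("\n" if yaml_str.endswith("\n") else "")
-- ===== Notes on version B (the rewrite author's own statement) =====
-- stated objective: alternative
-- what changed: Replaces the single stateful pass (seen_run_key flag plus a check on the output list's last element) by two passes: first collect the indices of run-key lines and make a set of all but the first, then emit lines, inserting a blank before an index in that set whenever the preceding original line is nonempty.
import Mathlib
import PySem

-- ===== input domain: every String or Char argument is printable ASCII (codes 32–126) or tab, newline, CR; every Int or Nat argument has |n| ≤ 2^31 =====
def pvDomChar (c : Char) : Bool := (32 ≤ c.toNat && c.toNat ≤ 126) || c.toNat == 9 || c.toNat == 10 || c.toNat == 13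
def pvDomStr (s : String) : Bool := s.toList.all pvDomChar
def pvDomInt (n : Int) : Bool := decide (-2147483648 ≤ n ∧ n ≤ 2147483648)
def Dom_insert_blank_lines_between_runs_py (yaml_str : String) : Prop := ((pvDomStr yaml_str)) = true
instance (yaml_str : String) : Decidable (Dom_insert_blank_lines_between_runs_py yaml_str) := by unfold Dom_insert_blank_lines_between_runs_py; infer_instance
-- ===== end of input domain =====

-- B replaces A's single stateful pass (seen_run_key flag + last-output check) by two passes:
-- collect run-key indices, drop the first, then insert a blank before each remaining index
-- when the preceding original line is nonempty ("alternative" objective, same O(n) cost).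

-- shared helper: the run-key test both Pythons write inline
def pvIsRunKey (line : String) : Bool :=
  PySem.Str.startswith line "  " &&
  PySem.Str.endswith (PySem.Str.strip line) ":" &&
  PySem.Str.strIsdigit (PySem.Str.slice (PySem.Str.strip line) none (some (-1)))

-- ===== PORT A =====
def pvALoop : List String → List String → Bool → List String
  | [], out, _ => out
  | line :: rest, out, seen =>
    let r := pvIsRunKey line
    let out' :=
      if r && seen && (out.isEmpty || !(PySem.List.pyGet? out (-1) == some "")) then
        out ++ [""]
      else out
    pvALoop rest (out' ++ [line]) (if r then true else seen)

def insert_blank_lines_between_runs_py (yaml_str : String) : String :=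
  PySem.Str.join "\n" (pvALoop (PySem.Str.splitlines yaml_str) [] false) ++
    (if PySem.Str.endswith yaml_str "\n" then "\n" else "")

-- ===== PORT B =====
def pvRunIdx (lines : List String) : List Int :=
  ((PySem.List.enumerate lines 0).filter (fun p => pvIsRunKey p.2)).map (·.1)

def pvBLoop (lines : List String) (need : PySem.Set Int) : List String :=
  (PySem.List.enumerate lines 0).foldl
    (fun out p =>
      (if decide (p.1 ∈ need) && !(PySem.List.pyGet? lines (p.1 - 1) == some "") then
        out ++ [""]
      else out) ++ [p.2])
    []

def insert_blank_lines_between_runs_py_alt (yaml_str : String) : String :=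
  PySem.Str.join "\n"
      (pvBLoop (PySem.Str.splitlines yaml_str)
        (PySem.Set.ofList ((pvRunIdx (PySem.Str.splitlines yaml_str)).drop 1))) ++
    (if PySem.Str.endswith yaml_str "\n" then "\n" else "")

-- ===== PRECONDITION & SPEC =====
def Spec_insert_blank_lines_between_runs_py (yaml_str : String) (out : String) : Prop := out = insert_blank_lines_between_runs_py_alt yaml_str
instance (yaml_str : String) (out : String) : Decidable (Spec_insert_blank_lines_between_runs_py yaml_str out) := by unfold Spec_insert_blank_lines_between_runs_py; infer_instance

-- ===== CLAIM (what is proved, stated in full; the proofs are below) =====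
def Claim_equal_insert_blank_lines_between_runs_py : Prop := ∀ (yaml_str : String), Dom_insert_blank_lines_between_runs_py yaml_str → Spec_insert_blank_lines_between_runs_py yaml_str (insert_blank_lines_between_runs_py yaml_str)

-- ===== LEMMAS AND PROOFS =====

-- common reference shape: emit `lines`, inserting a blank before a run key when one was
-- already seen and the previously emitted original line (`prev`) is not empty
def pvRef : List String → Option String → Bool → List String
  | [], _, _ => []
  | l :: rest, prev, seen =>
    (if pvIsRunKey l && seen && !(prev == some "") then [""] else []) ++
      l :: pvRef rest (some l) (pvIsRunKey l || seen)

lemma pvALoop_eq_ref (ls : List String) : ∀ (out : List String) (seen : Bool),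
    pvALoop ls out seen = out ++ pvRef ls out.getLast? seen := by
  induction ls with
  | nil => intro out seen; simp [pvALoop, pvRef]
  | cons l rest ih =>
    intro out seen
    have hguard : (out.isEmpty || !(PySem.List.pyGet? out (-1) == some "")) =
        !(out.getLast? == some "") := by
      cases out with
      | nil => simp
      | cons a as => simp [PySem.List.pyGet?_neg_one]
    simp only [pvALoop, hguard]
    rw [ih]
    simp only [pvRef, Bool.or_comm]
    split_ifs <;> simp_all

lemma mem_drop_one_sorted {l : List Int} (hp : l.Pairwise (· < ·)) (x : Int) :
    x ∈ l.drop 1 ↔ x ∈ l ∧ ∃ y ∈ l, y < x := by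
  cases l with
  | nil => simp
  | cons a t =>
    rw [List.pairwise_cons] at hp
    simp only [List.drop_succ_cons, List.drop_zero, List.mem_cons]
    constructor
    · intro hx
      exact ⟨Or.inr hx, a, Or.inl rfl, hp.1 x hx⟩
    · rintro ⟨hx, y, hy, hyx⟩
      rcases hx with rfl | hx
      · rcases hy with rfl | hy
        · omega
        · have := hp.1 y hy; omega
      · exact hx

lemma pvRunIdx_pairwise (lines : List String) : (pvRunIdx lines).Pairwise (· < ·) := by
  unfold pvRunIdx
  exact ((PySem.List.pairwise_lt_enumerate lines 0).filter _).map _ (fun a b h => h)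

lemma mem_pvRunIdx (lines : List String) (i : Int) :
    i ∈ pvRunIdx lines ↔
      ∃ (k : Nat) (_ : k < lines.length), i = (k : Int) ∧ pvIsRunKey lines[k] = true := by
  unfold pvRunIdx
  simp only [List.mem_map, List.mem_filter]
  constructor
  · rintro ⟨p, ⟨hp, hr⟩, rfl⟩
    obtain ⟨k, hk, rfl⟩ := (PySem.List.mem_enumerate_iff ..).mp hp
    exact ⟨k, hk, by simp, by simpa using hr⟩
  · rintro ⟨k, hk, rfl, hr⟩
    exact ⟨((k : Int), lines[k]), ⟨(PySem.List.mem_enumerate_iff ..).mpr ⟨k, hk, by simp⟩, hr⟩, rfl⟩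

lemma pv_mem_need (lines pre suf : List String) (l : String) (h : lines = pre ++ l :: suf) :
    ((pre.length : Int) ∈ (pvRunIdx lines).drop 1) ↔
      (pvIsRunKey l = true ∧ pre.any pvIsRunKey = true) := by
  rw [mem_drop_one_sorted (pvRunIdx_pairwise lines)]
  constructor
  · rintro ⟨hmem, y, hy, hylt⟩
    obtain ⟨k, hk, hkeq, hr⟩ := (mem_pvRunIdx ..).mp hmem
    have hkl : k = pre.length := by exact_mod_cast hkeq.symm
    subst hkl
    obtain ⟨j, hj, rfl, hrj⟩ := (mem_pvRunIdx ..).mp hy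
    have hjlt : j < pre.length := by exact_mod_cast hylt
    constructor
    · have : lines[pre.length]'hk = l := by
        subst h; simp [List.getElem_append_right (Nat.le_refl pre.length)]
      rwa [this] at hr
    · refine List.any_eq_true.mpr ⟨pre[j], List.getElem_mem hjlt, ?_⟩
      have : lines[j]'hj = pre[j]'hjlt := by
        subst h; exact List.getElem_append_left hjlt
      rwa [this] at hrj
  · rintro ⟨hl, hany⟩
    obtain ⟨x, hx, hrx⟩ := List.any_eq_true.mp hany
    obtain ⟨j, hj, rfl⟩ := List.mem_iff_getElem.mp hx
    have hlen : pre.length < lines.length := by subst h; simp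
    refine ⟨(mem_pvRunIdx ..).mpr ⟨pre.length, hlen, rfl, ?_⟩,
      (j : Int), (mem_pvRunIdx ..).mpr ⟨j, by omega, rfl, ?_⟩, by exact_mod_cast hj⟩
    · have : lines[pre.length]'hlen = l := by
        subst h; simp [List.getElem_append_right (Nat.le_refl pre.length)]
      rwa [this]
    · have : lines[j]'(by omega) = pre[j]'hj := by
        subst h; exact List.getElem_append_left hj
      rwa [this]

lemma pvBStep_cond (lines pre suf : List String) (l : String)
    (h : lines = pre ++ l :: suf) :
    (decide ((pre.length : Int) ∈ PySem.Set.ofList ((pvRunIdx lines).drop 1)) &&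
      !(PySem.List.pyGet? lines ((pre.length : Int) - 1) == some "")) =
    (pvIsRunKey l && pre.any pvIsRunKey && !(pre.getLast? == some "")) := by
  rw [show (decide ((pre.length : Int) ∈ PySem.Set.ofList ((pvRunIdx lines).drop 1)))
      = decide ((pre.length : Int) ∈ (pvRunIdx lines).drop 1) by
    simp [PySem.Set.mem_ofList]]
  by_cases hm : (pvIsRunKey l = true ∧ pre.any pvIsRunKey = true)
  · rw [decide_eq_true ((pv_mem_need lines pre suf l h).mpr hm)]
    have hpre : pre ≠ [] := by
      rintro rfl; simp at hm
    have hlen1 : 1 ≤ pre.length := List.length_pos_iff.mpr hpre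
    have hidx : PySem.List.pyGet? lines ((pre.length : Int) - 1) = pre.getLast? := by
      have hcast : (pre.length : Int) - 1 = ((pre.length - 1 : Nat) : Int) := by omega
      rw [hcast, PySem.List.pyGet?_natCast]
      have : lines[pre.length - 1]? = pre[pre.length - 1]? := by
        subst h; rw [List.getElem?_append_left (by omega)]
      rw [this, pre.getLast?_eq_getElem?]
    rw [hidx, hm.1, hm.2]
    simp
  · rw [decide_eq_false (fun hmm => hm ((pv_mem_need lines pre suf l h).mp hmm))]
    cases hr : pvIsRunKey l <;> cases ha : pre.any pvIsRunKey <;> simp_all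

lemma pvBLoop_eq_ref (lines : List String) : ∀ (suf pre : List String) (out : List String),
    lines = pre ++ suf →
    (PySem.List.enumerate suf (pre.length : Int)).foldl
      (fun out p =>
        (if decide (p.1 ∈ PySem.Set.ofList ((pvRunIdx lines).drop 1)) &&
            !(PySem.List.pyGet? lines (p.1 - 1) == some "") then
          out ++ [""]
        else out) ++ [p.2]) out
    = out ++ pvRef suf pre.getLast? (pre.any pvIsRunKey) := by
  intro suf
  induction suf with
  | nil => intro pre out _; simp [PySem.List.enumerate_nil, pvRef]
  | cons l rest ih =>
    intro pre out h
    rw [PySem.List.enumerate_cons, List.foldl_cons]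
    have hcond := pvBStep_cond lines pre rest l h
    have hpre' : lines = (pre ++ [l]) ++ rest := by simpa using h
    have := ih (pre ++ [l])
      ((if decide ((pre.length : Int) ∈ PySem.Set.ofList ((pvRunIdx lines).drop 1)) &&
          !(PySem.List.pyGet? lines ((pre.length : Int) - 1) == some "") then
        out ++ [""] else out) ++ [l]) hpre'
    simp only [List.length_append, List.length_singleton, Nat.cast_add, Nat.cast_one] at this
    rw [this]
    simp only [hcond, pvRef, List.getLast?_append, List.getLast?_singleton, List.any_append,
      List.any_cons, List.any_nil, Bool.or_false]
    simp only [Bool.or_comm]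
    split_ifs <;> simp_all

-- ===== VERDICT (by name: the statement is the Claim_ definition above) =====
theorem insert_blank_lines_between_runs_py_spec : Claim_equal_insert_blank_lines_between_runs_py := by
  intro yaml_str _
  unfold Spec_insert_blank_lines_between_runs_py
  unfold insert_blank_lines_between_runs_py insert_blank_lines_between_runs_py_alt
  have hout : pvALoop (PySem.Str.splitlines yaml_str) [] false =
      pvBLoop (PySem.Str.splitlines yaml_str)
        (PySem.Set.ofList ((pvRunIdx (PySem.Str.splitlines yaml_str)).drop 1)) := by
    rw [pvALoop_eq_ref]
    have := pvBLoop_eq_ref (PySem.Str.splitlines yaml_str) (PySem.Str.splitlines yaml_str) [] []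
      (by simp)
    simp only [List.length_nil, Nat.cast_zero, List.getLast?_nil, List.any_nil,
      List.nil_append] at this
    unfold pvBLoop
    rw [this]
    simp
  rw [hout]
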